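-- pv_equiv track=rewrite | github.com/jaehaaheaj/ProjectEuler | python/PE011.py | maxSlash
-- ===== SOURCE A (Python) =====
-- def maxSlash(numList, n):
-- 	maxmult = 0
-- 	for i in range(0, len(numList) - n):
-- 		for j in range(0, len(numList[i]) - n):
-- 			temp = 1
-- 			for x in range(0, n):
-- 				temp *= numList[i+n-x][j+x]
-- 			if temp > maxmult:
-- 				maxmult = temp
-- 	return maxmult
-- ===== SOURCE B (Python) =====
-- def maxSlash(numList, n):
--     # A window of n anti-diagonal entries needs n+1 rows below its start row.
--     if n >= len(numList):
--         return 0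
--     # Layered DP: P[r][c] = product of the k entries running up-right from (r, c)
--     # after k rounds; replaces A's innermost per-window product loop.
--     P = [[1] * len(row) for row in numList]
--     for _ in range(n):
--         P = [[numList[r][c] * P[r - 1][c + 1]
--               if r >= 1 and c + 1 < len(numList[r - 1]) else 0
--               for c in range(len(numList[r]))]
--              for r in range(len(numList))]
--     best = 0
--     for i in range(len(numList) - n):
--         for j in range(len(numList[i]) - n):
--             t = P[i + n][j]
--             if t > best:
--                 best = t
--     return best
-- ===== Notes on version B (the rewrite author's own statement) =====
-- stated objective: alternative
-- what changed: A recomputes each length-n anti-diagonal product with an innermost loop; B instead builds a layered DP table of up-right running products (P[r][c] = grid[r][c] * P[r-1][c+1], n rounds) and the max scan just reads table entries.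
import Mathlib
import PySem

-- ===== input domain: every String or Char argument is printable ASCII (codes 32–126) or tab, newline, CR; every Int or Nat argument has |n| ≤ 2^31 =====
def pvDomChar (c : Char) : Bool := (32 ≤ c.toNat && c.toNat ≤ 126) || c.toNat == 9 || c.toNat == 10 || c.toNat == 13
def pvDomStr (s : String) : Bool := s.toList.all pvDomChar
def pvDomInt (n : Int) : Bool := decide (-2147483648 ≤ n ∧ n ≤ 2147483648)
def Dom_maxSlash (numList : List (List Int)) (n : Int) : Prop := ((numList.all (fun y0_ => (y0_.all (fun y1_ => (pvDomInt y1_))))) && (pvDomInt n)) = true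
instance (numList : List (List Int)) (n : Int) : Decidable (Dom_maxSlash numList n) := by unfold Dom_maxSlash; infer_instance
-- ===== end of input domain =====

-- B replaces A's innermost per-window product loop by a layered DP table of
-- up-right running products (same cost class; objective: alternative).

-- ===== PORT A =====
def maxSlash (numList : List (List Int)) (n : Int) : Int :=
  (PySem.List.pyRange 0 (PySem.List.len numList - n)).foldl (fun maxmult i =>
    (PySem.List.pyRange 0 (PySem.List.len (PySem.List.pyGetD numList i []) - n)).foldl (fun maxmult j =>
      let temp := (PySem.List.pyRange 0 n).foldl (fun temp x =>
        temp * PySem.List.pyGetD (PySem.List.pyGetD numList (i + n - x) []) (j + x) 0) 1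
      if temp > maxmult then temp else maxmult) maxmult) 0

-- ===== PORT B =====
-- one DP round: newP[r][c] = numList[r][c] * P[r-1][c+1] when that neighbour exists, else 0
def stepP (numList P : List (List Int)) : List (List Int) :=
  (PySem.List.pyRange 0 (PySem.List.len numList)).map (fun r =>
    (PySem.List.pyRange 0 (PySem.List.len (PySem.List.pyGetD numList r []))).map (fun c =>
      if 1 ≤ r ∧ c + 1 < PySem.List.len (PySem.List.pyGetD numList (r - 1) []) then
        PySem.List.pyGetD (PySem.List.pyGetD numList r []) c 0 *
          PySem.List.pyGetD (PySem.List.pyGetD P (r - 1) []) (c + 1) 0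
      else 0))

def maxSlash_alt (numList : List (List Int)) (n : Int) : Int :=
  if PySem.List.len numList ≤ n then 0 else
  let P0 := numList.map (fun row => List.replicate row.length (1 : Int))
  let P := (PySem.List.pyRange 0 n).foldl (fun P _ => stepP numList P) P0
  (PySem.List.pyRange 0 (PySem.List.len numList - n)).foldl (fun best i =>
    (PySem.List.pyRange 0 (PySem.List.len (PySem.List.pyGetD numList i []) - n)).foldl (fun best j =>
      let t := PySem.List.pyGetD (PySem.List.pyGetD P (i + n) []) j 0
      if t > best then t else best) best) 0

-- ===== PRECONDITION & SPEC =====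
-- Pre_ is exactly the inputs where A returns: n ≥ 0 (range(len-n) walks past the
-- last row for n < 0, IndexError) and every anti-diagonal window the loops read
-- stays inside its (possibly ragged) rows (else IndexError).
def Pre_maxSlash (numList : List (List Int)) (n : Int) : Prop :=
  0 ≤ n ∧ ∀ i < numList.length - n.toNat, ∀ j < (numList.getD i []).length - n.toNat,
    ∀ x < n.toNat, j + x < (numList.getD (i + n.toNat - x) []).length
instance (numList : List (List Int)) (n : Int) : Decidable (Pre_maxSlash numList n) := by
  unfold Pre_maxSlash; infer_instance

def pvWitness_maxSlash : List (List Int) × Int := ([[1, 2], [3, 4]], 1)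

def Spec_maxSlash (numList : List (List Int)) (n : Int) (out : Int) : Prop := out = maxSlash_alt numList n
instance (numList : List (List Int)) (n : Int) (out : Int) : Decidable (Spec_maxSlash numList n out) := by unfold Spec_maxSlash; infer_instance

-- ===== CLAIM (what is proved, stated in full; the proofs are below) =====
def Claim_equal_maxSlash : Prop := ∀ (numList : List (List Int)) (n : Int), Dom_maxSlash numList n → Pre_maxSlash numList n → Spec_maxSlash numList n (maxSlash numList n)

-- ===== LEMMAS AND PROOFS =====

-- product of the N entries running up-right from (r, c)
def prodDiag (g : List (List Int)) : Nat → Nat → Nat → Int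
  | _, _, 0 => 1
  | r, c, Nat.succ k => ((g.getD r []).getD c 0) * prodDiag g (r - 1) (c + 1) k

-- guard chain of B's DP at (r, c) for depth K
def GC (g : List (List Int)) (r c K : Nat) : Prop :=
  ∀ t < K, t < r ∧ c + t + 1 < (g.getD (r - t - 1) []).length

lemma foldl_const_eq_iterate {α β : Type} (f : β → β) (l : List α) (init : β) :
    l.foldl (fun b _ => f b) init = f^[l.length] init := by
  induction l generalizing init with
  | nil => rfl
  | cons a t ih => simp [List.foldl_cons, ih, Function.iterate_succ_apply]

lemma stepP_getD (g P : List (List Int)) (r : Nat) (hr : r < g.length) :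
    (stepP g P).getD r [] =
      (List.range (g.getD r []).length).map (fun c =>
        if 1 ≤ r ∧ c + 1 < (g.getD (r - 1) []).length then
          (g.getD r []).getD c 0 * ((P.getD (r - 1) []).getD (c + 1) 0)
        else 0) := by
  unfold stepP
  simp only [PySem.List.len_eq, PySem.List.pyRange_zero_nat, List.map_map]
  rw [List.getD_eq_getElem?_getD, List.getElem?_map, List.getElem?_range hr]
  simp only [Option.map_some, Option.getD_some, Function.comp_apply, PySem.List.pyGetD_natCast]
  apply List.map_congr_left
  intro c hc
  simp only [List.mem_range] at hc
  simp only [Function.comp_apply]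
  rcases Nat.eq_zero_or_pos r with h0 | h1
  · subst h0; simp
  · have hcast : ((r : Int) - 1) = ((r - 1 : Nat) : Int) := by omega
    have e1 : ((c:Int) + 1) = ((c + 1 : Nat) : Int) := by push_cast; ring
    rw [hcast, e1]
    simp only [PySem.List.pyGetD_natCast]
    have hcond : ((1:Int) ≤ (r:Int) ∧ ((c + 1 : Nat):Int) < ((g.getD (r-1) []).length : Int)) ↔ (1 ≤ r ∧ c + 1 < (g.getD (r - 1) []).length) := by
      constructor <;> (intro ⟨a,b⟩; exact ⟨by omega, by omega⟩)
    split_ifs with hA hB hB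
    · rfl
    · exact absurd (hcond.mp hA) hB
    · exact absurd (hcond.mpr hB) hA
    · rfl

lemma table_entry (g : List (List Int)) (K : Nat) :
    ∀ r c : Nat, r < g.length → c < (g.getD r []).length → GC g r c K →
      (((stepP g)^[K] (g.map (fun row => List.replicate row.length (1 : Int)))).getD r []).getD c 0
        = prodDiag g r c K := by
  induction K with
  | zero =>
    intro r c hr hc _
    simp only [Function.iterate_zero, id_eq, prodDiag]
    rw [List.getD_eq_getElem (l := g.map (fun row => List.replicate row.length (1:Int))) (hn := by simpa using hr), List.getElem_map]
    have hc' : c < (List.replicate (g[r].length) (1:Int)).length := by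
      simp only [List.length_replicate]
      rwa [List.getD_eq_getElem (hn := hr)] at hc
    rw [List.getD_eq_getElem (hn := hc'), List.getElem_replicate]
  | succ K ih =>
    intro r c hr hc hgc
    rw [Function.iterate_succ_apply', stepP_getD g _ r hr]
    rw [List.getD_eq_getElem?_getD, List.getElem?_map, List.getElem?_range hc]
    simp only [Option.map_some, Option.getD_some]
    obtain ⟨h0r, h0c⟩ := hgc 0 (Nat.succ_pos K)
    rw [if_pos ⟨h0r, by simpa using h0c⟩]
    rw [ih (r-1) (c+1) (by omega) (by simpa using h0c) ?_]
    · simp [prodDiag]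
    · intro t ht
      obtain ⟨ha, hb⟩ := hgc (t+1) (by omega)
      constructor
      · omega
      · have e : r - (t+1) - 1 = r - 1 - t - 1 := by omega
        rw [e] at hb; omega

lemma foldl_mul_prodDiag (g : List (List Int)) :
    ∀ (N : Nat) (r c : Nat) (t : Int),
      (List.range N).foldl (fun t k => t * (g.getD (r - k) []).getD (c + k) 0) t
        = t * prodDiag g r c N := by
  intro N
  induction N with
  | zero => intro r c t; simp [prodDiag]
  | succ N ih =>
    intro r c t
    rw [List.range_succ_eq_map, List.foldl_cons, List.foldl_map]
    have e : ∀ (t' : Int) (k : Nat), k ∈ List.range N →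
        t' * (g.getD (r - (k+1)) []).getD (c + (k+1)) 0
          = t' * (g.getD ((r-1) - k) []).getD ((c+1) + k) 0 := by
      intro t' k _
      have h1 : r - (k+1) = (r-1) - k := by omega
      have h2 : c + (k+1) = (c+1) + k := by omega
      rw [h1, h2]
    rw [PySem.List.foldl_congr_mem _ _ _ _ (fun t' k hk => e t' k hk)]
    rw [ih (r-1) (c+1)]
    simp only [prodDiag, Nat.sub_zero, Nat.add_zero]
    ring

lemma tempA_eq_prodDiag (g : List (List Int)) (N i j : Nat) :
    (PySem.List.pyRange 0 (N : Int)).foldl (fun temp x =>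
        temp * PySem.List.pyGetD (PySem.List.pyGetD g ((i : Int) + N - x) []) ((j : Int) + x) 0) 1
      = prodDiag g (i + N) j N := by
  rw [PySem.List.pyRange_zero_nat, List.foldl_map]
  have e : ∀ (t : Int) (k : Nat), k ∈ List.range N →
      t * PySem.List.pyGetD (PySem.List.pyGetD g ((i : Int) + N - (k:Int)) []) ((j : Int) + (k:Int)) 0
        = t * (g.getD ((i+N) - k) []).getD (j + k) 0 := by
    intro t k hk
    simp only [List.mem_range] at hk
    have e1 : ((i : Int) + N - (k:Int)) = (((i+N) - k : Nat) : Int) := by omega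
    have e2 : ((j : Int) + (k:Int)) = ((j + k : Nat) : Int) := by omega
    rw [e1, e2, PySem.List.pyGetD_natCast, PySem.List.pyGetD_natCast]
  rw [PySem.List.foldl_congr_mem _ _ _ _ (fun t k hk => e t k hk)]
  rw [foldl_mul_prodDiag g N (i+N) j 1, one_mul]

theorem maxSlash_spec : Claim_equal_maxSlash := by
  intro g n _ hpre
  obtain ⟨hn, hwin⟩ := hpre
  obtain ⟨N, rfl⟩ := Int.eq_ofNat_of_zero_le hn
  simp only [Int.toNat_natCast] at hwin
  unfold Spec_maxSlash maxSlash maxSlash_alt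
  simp only []
  by_cases hbig : PySem.List.len g ≤ (N : Int)
  · rw [if_pos hbig]
    rw [PySem.List.len_eq] at hbig ⊢
    rw [PySem.List.pyRange_one_eq_nil (a := 0) (b := (g.length : Int) - (N : Int)) (by omega)]
    rfl
  · rw [if_neg hbig]
    apply PySem.List.foldl_congr_mem
    intro acc i hi
    rw [PySem.List.mem_pyRange_one] at hi
    obtain ⟨hi0, hiu⟩ := hi
    obtain ⟨iN, rfl⟩ := Int.eq_ofNat_of_zero_le hi0
    rw [PySem.List.len_eq] at hiu
    apply PySem.List.foldl_congr_mem
    intro acc2 j hj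
    rw [PySem.List.mem_pyRange_one] at hj
    obtain ⟨hj0, hju⟩ := hj
    obtain ⟨jN, rfl⟩ := Int.eq_ofNat_of_zero_le hj0
    rw [PySem.List.pyGetD_natCast, PySem.List.len_eq] at hju
    have hiN : iN + N < g.length := by omega
    have hjN : jN + N < (g.getD iN []).length := by omega
    have hrow : jN < (g.getD (iN + N) []).length := by
      rcases Nat.eq_zero_or_pos N with h0 | hpos
      · subst h0; simpa using (by omega : jN < (g.getD iN []).length)
      · have := hwin iN (by omega) jN (by omega) 0 hpos
        simpa using this
    have hGC : GC g (iN + N) jN N := by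
      intro t ht
      refine ⟨by omega, ?_⟩
      rcases Nat.lt_or_ge (t + 1) N with hlt | hge
      · have h := hwin iN (by omega) jN (by omega) (t + 1) hlt
        have e : iN + N - (t + 1) = iN + N - t - 1 := by omega
        rw [e] at h
        omega
      · have htN : t + 1 = N := by omega
        have e : iN + N - t - 1 = iN := by omega
        rw [e]
        omega
    have hA := tempA_eq_prodDiag g N iN jN
    have hlen : (PySem.List.pyRange 0 (N : Int)).length = N := by
      rw [PySem.List.pyRange_zero_nat]; simp
    rw [foldl_const_eq_iterate (stepP g), hlen]
    have eIdx : ((iN : Int) + (N : Int)) = ((iN + N : Nat) : Int) := by push_cast; ring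
    rw [eIdx, PySem.List.pyGetD_natCast, PySem.List.pyGetD_natCast]
    rw [table_entry g N (iN + N) jN hiN hrow hGC]
    rw [eIdx] at hA
    rw [hA]
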